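-- pv_equiv track=rewrite | github.com/jaredkoontz/leetcode_py | 2500_delete_greatest_val_in_row/test_delete_greatest_val_in_row.py | deleteGreatestValue_mine
-- ===== SOURCE A (Python) =====
-- def deleteGreatestValue_mine(grid: list[list[int]]) -> int:
--     if not grid:
--         return 0
--     counts = 0
--     while grid[0]:
--         local_max = float("-inf")
--         for row in grid:
--             max_index = max(range(len(row)), key=row.__getitem__)
--             local_max = max(local_max, row[max_index])
--             del row[max_index]
--         counts += local_max
--     return counts
-- ===== SOURCE B (Python) =====
-- def deleteGreatestValue_mine(grid: list[list[int]]) -> int: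
--     if not grid:
--         return 0
--     rows = [sorted(row, reverse=True) for row in grid]
--     return sum(max(row[i] for row in rows) for i in range(len(grid[0])))
-- ===== Notes on version B (the rewrite author's own statement) =====
-- stated objective: faster
-- what changed: B sorts each row descending once and sums the column-wise maxima, replacing A's destructive loop that rescans every row for its max and deletes it on each of the m passes.
import Mathlib
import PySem

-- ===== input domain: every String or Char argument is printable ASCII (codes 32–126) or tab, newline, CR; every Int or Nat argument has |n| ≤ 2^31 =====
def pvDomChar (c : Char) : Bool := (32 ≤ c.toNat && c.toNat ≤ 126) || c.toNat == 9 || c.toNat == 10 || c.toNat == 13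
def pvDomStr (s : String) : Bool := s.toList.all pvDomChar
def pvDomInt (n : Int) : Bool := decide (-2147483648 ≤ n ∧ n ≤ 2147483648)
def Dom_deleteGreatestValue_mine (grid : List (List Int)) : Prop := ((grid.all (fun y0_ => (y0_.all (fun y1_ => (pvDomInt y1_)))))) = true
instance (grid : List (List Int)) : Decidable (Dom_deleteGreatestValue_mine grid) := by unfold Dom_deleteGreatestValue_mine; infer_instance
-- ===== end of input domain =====

-- B sorts each row descending once and sums column-wise maxima instead of A's repeated
-- scan-for-max-and-delete passes (faster; A mutates its argument in place — the claim is
-- about the return value only, B does not mutate).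

-- ===== PORT A =====
-- max(range(len(row)), key=row.__getitem__): first index of the maximum (none on an empty row = ValueError)
def pvArgmax (row : List Int) : Option Nat :=
  PySem.List.max? (List.range row.length) (fun i => row.getD i 0)

-- the body of the for-loop over the rows: update local_max (none = float("-inf")) and delete the max of each row
def pvStep : List (List Int) → Option Int → Option (Option Int × List (List Int))
  | [], lm => some (lm, [])
  | r :: rs, lm =>
    match pvArgmax r with
    | none => none
    | some i =>
      let v := r.getD i 0
      let lm' : Option Int := some (match lm with | none => v | some m => max m v)
      match pvStep rs lm' with
      | none => none
      | some (lmf, rs') => some (lmf, r.eraseIdx i :: rs')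

-- the while-loop; fuel = len(grid[0]) (each successful pass deletes exactly one element of row 0)
def pvLoop : Nat → List (List Int) → Int → Int
  | 0, _, counts => counts
  | f + 1, g, counts =>
    if (g.headD []).isEmpty then counts
    else
      match pvStep g none with
      | some (some m, g') => pvLoop f g' (counts + m)
      | _ => 0   -- Python raises ValueError here (a row emptied early); excluded by Pre_

def deleteGreatestValue_mine (grid : List (List Int)) : Int :=
  if grid.isEmpty then 0 else pvLoop (grid.headD []).length grid 0

-- ===== PORT B =====
-- max(row[i] for row in rows): running max over the rows (rows is nonempty whenever reached)
def pvColMax (rows : List (List Int)) (i : Nat) : Int :=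
  match rows with
  | [] => 0
  | r :: rs => rs.foldl (fun m r' => max m (r'.getD i 0)) (r.getD i 0)

def deleteGreatestValue_mine_alt (grid : List (List Int)) : Int :=
  match grid with
  | [] => 0
  | g0 :: _ =>
    let rows := grid.map (fun r => PySem.List.sorted r (fun x => x) true)
    ((List.range g0.length).map (fun i => pvColMax rows i)).sum

-- ===== PRECONDITION & SPEC =====
-- Pre_ excludes exactly the inputs where A raises ValueError (and B IndexError): a row strictly
-- shorter than row 0 empties before the while-loop ends.
def Pre_deleteGreatestValue_mine (grid : List (List Int)) : Prop :=
  ∀ r ∈ grid, (grid.headD []).length ≤ r.length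
instance (grid : List (List Int)) : Decidable (Pre_deleteGreatestValue_mine grid) := by
  unfold Pre_deleteGreatestValue_mine; infer_instance

def pvWitness_deleteGreatestValue_mine : List (List Int) := [[1, 2, 4], [3, 3, 1]]

def Spec_deleteGreatestValue_mine (grid : List (List Int)) (out : Int) : Prop := out = deleteGreatestValue_mine_alt grid
instance (grid : List (List Int)) (out : Int) : Decidable (Spec_deleteGreatestValue_mine grid out) := by unfold Spec_deleteGreatestValue_mine; infer_instance

-- ===== CLAIM (what is proved, stated in full; the proofs are below) =====
def Claim_equal_deleteGreatestValue_mine : Prop := ∀ (grid : List (List Int)), Dom_deleteGreatestValue_mine grid → Pre_deleteGreatestValue_mine grid → Spec_deleteGreatestValue_mine grid (deleteGreatestValue_mine grid)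

-- ===== LEMMAS AND PROOFS =====

-- descending sort of an Int list (identity key)
def pvSortD (r : List Int) : List Int := PySem.List.sorted r (fun x => x) true

theorem pvSortD_eq_rev (xs : List Int) :
    pvSortD xs = (PySem.List.sorted xs (fun x => x) false).reverse := by
  have h := PySem.List.sorted_id_eq_of_perm_of_pairwise (xs := xs)
      (ys := (pvSortD xs).reverse)
      ((List.reverse_perm (pvSortD xs)).trans (PySem.List.sorted_perm xs (fun x => x) true))
      (by
        rw [List.pairwise_reverse]
        exact PySem.List.sorted_pairwise_rev xs (fun x => x))
  rw [h, List.reverse_reverse]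

-- a descending permutation of xs IS sorted(xs, reverse=True)
theorem pvSortD_unique {xs ys : List Int} (hp : ys.Perm xs)
    (hs : ys.Pairwise (fun a b => b ≤ a)) : pvSortD xs = ys := by
  have h := PySem.List.sorted_id_eq_of_perm_of_pairwise (xs := xs) (ys := ys.reverse)
      ((List.reverse_perm ys).trans hp) (by rw [List.pairwise_reverse]; exact hs)
  rw [pvSortD_eq_rev, h, List.reverse_reverse]

theorem pvSortD_perm (xs : List Int) : (pvSortD xs).Perm xs :=
  PySem.List.sorted_perm xs (fun x => x) true

theorem pvSortD_pairwise (xs : List Int) : (pvSortD xs).Pairwise (fun a b => b ≤ a) :=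
  PySem.List.sorted_pairwise_rev xs (fun x => x)

-- one row of the for-loop: the deleted value is the row max = head of the descending sort,
-- and the remaining row's descending sort is the tail
theorem pvArgmax_spec {r : List Int} (hr : r ≠ []) :
    ∃ i, pvArgmax r = some i ∧ i < r.length ∧
      r.getD i 0 = (pvSortD r).headD 0 ∧
      pvSortD (r.eraseIdx i) = (pvSortD r).tail := by
  have hlen : 0 < r.length := List.length_pos_iff.mpr hr
  obtain ⟨i, hi⟩ : ∃ i, pvArgmax r = some i := by
    cases h : pvArgmax r with
    | some i => exact ⟨i, rfl⟩
    | none =>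
      exfalso
      have hnil := (PySem.List.max?_eq_none_iff _ _).mp h
      have h0 : (0 : Nat) ∈ List.range r.length := List.mem_range.mpr hlen
      rw [hnil] at h0
      exact (List.not_mem_nil h0)
  have himem : i ∈ List.range r.length := PySem.List.max?_mem hi
  have hilt : i < r.length := List.mem_range.mp himem
  have hmax : ∀ j ∈ List.range r.length, r.getD j 0 ≤ r.getD i 0 :=
    PySem.List.max?_isMax hi
  have hsne : pvSortD r ≠ [] := by
    intro h
    have hp := pvSortD_perm r
    rw [h] at hp
    exact hr hp.symm.eq_nil
  obtain ⟨M, t, hMt⟩ := List.exists_cons_of_ne_nil hsne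
  have hhead : (pvSortD r).headD 0 = M := by rw [hMt]; rfl
  have hMmem : M ∈ r := by
    have : M ∈ pvSortD r := by rw [hMt]; exact List.mem_cons_self
    exact (pvSortD_perm r).mem_iff.mp this
  have hMge : ∀ y ∈ r, y ≤ M :=
    PySem.List.key_head_sorted_rev_ge (xs := r) (key := fun x => x) hMt
  have hgetM : r.getD i 0 = M := by
    have h1 : r.getD i 0 ≤ M := by
      apply hMge
      have : r.getD i 0 = r[i] := List.getD_eq_getElem r 0 hilt
      rw [this]; exact List.getElem_mem hilt
    obtain ⟨j, hj, hjM⟩ := List.mem_iff_getElem.mp hMmem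
    have h2 : M ≤ r.getD i 0 := by
      have := hmax j (List.mem_range.mpr hj)
      rwa [List.getD_eq_getElem r 0 hj, hjM] at this
    omega
  have hget? : r[i]? = some M := by
    rw [List.getElem?_eq_getElem hilt, ← hgetM, List.getD_eq_getElem r 0 hilt]
  have hperm1 : (M :: r.eraseIdx i).Perm r := PySem.List.perm_cons_eraseIdx r hget?
  have hperm2 : t.Perm (r.eraseIdx i) := by
    have hpr : (M :: t).Perm (M :: r.eraseIdx i) := by
      have hL : (M :: t).Perm r := by rw [← hMt]; exact pvSortD_perm r
      exact hL.trans hperm1.symm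
    exact hpr.cons_inv
  have hpt : t.Pairwise (fun a b => b ≤ a) := by
    have hpw := pvSortD_pairwise r
    rw [hMt] at hpw
    exact hpw.tail
  have htail : pvSortD (r.eraseIdx i) = t := pvSortD_unique hperm2 hpt
  refine ⟨i, hi, hilt, ?_, ?_⟩
  · rw [hhead]; exact hgetM
  · rw [hMt]; exact htail

-- tail/getD arithmetic
theorem tail_getD (l : List Int) (i : Nat) : l.tail.getD i 0 = l.getD (i + 1) 0 := by
  cases l <;> simp

theorem foldl_max_tail (rs : List (List Int)) (i : Nat) : ∀ a : Int,
    (rs.map List.tail).foldl (fun m r' => max m (r'.getD i 0)) a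
      = rs.foldl (fun m r' => max m (r'.getD (i + 1) 0)) a := by
  induction rs with
  | nil => intro a; rfl
  | cons s ss ih =>
    intro a
    simp only [List.map_cons, List.foldl_cons, tail_getD]
    exact ih _

theorem pvColMax_tail (rows : List (List Int)) (i : Nat) :
    pvColMax (rows.map List.tail) i = pvColMax rows (i + 1) := by
  cases rows with
  | nil => rfl
  | cons r rs =>
    simp only [List.map_cons, pvColMax, tail_getD]
    exact foldl_max_tail rs i _

theorem headD_getD (l : List Int) : l.headD 0 = l.getD 0 0 := by cases l <;> rfl

theorem foldl_headD_map (rs : List (List Int)) : ∀ a : Int,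
    rs.foldl (fun m r => max m ((pvSortD r).headD 0)) a
      = (rs.map pvSortD).foldl (fun m r' => max m (r'.getD 0 0)) a := by
  induction rs with
  | nil => intro a; rfl
  | cons s ss ih =>
    intro a
    simp only [List.map_cons, List.foldl_cons]
    rw [headD_getD]
    exact ih _

-- fold over a 'some' local_max stays a plain fold
theorem pvLmFold (g : List (List Int)) (m0 : Int) (f : List Int → Int) :
    g.foldl (fun (lm : Option Int) r =>
        some (match lm with | none => f r | some m => max m (f r))) (some m0)
      = some (g.foldl (fun m r => max m (f r)) m0) := by
  induction g generalizing m0 with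
  | nil => rfl
  | cons r rs ih => simp only [List.foldl_cons]; exact ih _

-- the whole for-loop over the rows, all rows nonempty
theorem pvStep_spec (g : List (List Int)) (lm : Option Int)
    (hne : ∀ r ∈ g, r ≠ []) :
    ∃ g', pvStep g lm =
        some (g.foldl (fun (lm : Option Int) r =>
          some (match lm with | none => (pvSortD r).headD 0 | some m => max m ((pvSortD r).headD 0))) lm, g')
      ∧ g'.map pvSortD = (g.map pvSortD).map List.tail := by
  induction g generalizing lm with
  | nil => exact ⟨[], rfl, rfl⟩
  | cons r rs ih =>
    obtain ⟨i, hi, hilt, hval, htail⟩ := pvArgmax_spec (hne r List.mem_cons_self)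
    obtain ⟨g', hstep, hmap⟩ := ih
        (some (match lm with | none => (pvSortD r).headD 0 | some m => max m ((pvSortD r).headD 0)))
        (fun r hr => hne r (List.mem_cons_of_mem _ hr))
    refine ⟨r.eraseIdx i :: g', ?_, ?_⟩
    · simp only [pvStep, hi, List.foldl_cons, hval]
      rw [hstep]
    · simp only [List.map_cons, hmap, htail]

-- main invariant: the while-loop computes the sum of column maxima of the sorted rows
theorem pvLoop_spec (f : Nat) :
    ∀ (g : List (List Int)) (counts : Int), g ≠ [] →
      (∀ r ∈ g, f ≤ r.length) →
      pvLoop f g counts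
        = counts + ((List.range f).map (fun i => pvColMax (g.map pvSortD) i)).sum := by
  induction f with
  | zero => intro g counts _ _; simp [pvLoop]
  | succ f ih =>
    intro g counts hg hlen
    obtain ⟨r0, rs, rfl⟩ := List.exists_cons_of_ne_nil hg
    have hr0 : r0 ≠ [] := by
      have := hlen r0 List.mem_cons_self
      intro h; subst h; simp at this
    have hnemp : ∀ r ∈ r0 :: rs, r ≠ [] := by
      intro r hr h
      have := hlen r hr; subst h; simp at this
    obtain ⟨g', hstep, hmap⟩ := pvStep_spec (r0 :: rs) none hnemp
    have hfold : (r0 :: rs).foldl (fun (lm : Option Int) r =>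
          some (match lm with | none => (pvSortD r).headD 0 | some m => max m ((pvSortD r).headD 0))) none
        = some (rs.foldl (fun m r => max m ((pvSortD r).headD 0)) ((pvSortD r0).headD 0)) := by
      simp only [List.foldl_cons]
      exact pvLmFold rs _ _
    have hcol0 : rs.foldl (fun m r => max m ((pvSortD r).headD 0)) ((pvSortD r0).headD 0)
        = pvColMax ((r0 :: rs).map pvSortD) 0 := by
      simp only [List.map_cons, pvColMax]
      rw [foldl_headD_map, headD_getD]
    have hglen : g'.length = (r0 :: rs).length := by
      have := congrArg List.length hmap
      simpa using this
    have hg'ne : g' ≠ [] := by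
      intro h; rw [h] at hglen; simp at hglen
    have hg'len : ∀ r' ∈ g', f ≤ r'.length := by
      intro r' hr'
      have h1 : pvSortD r' ∈ g'.map pvSortD := List.mem_map_of_mem hr'
      rw [hmap] at h1
      obtain ⟨s, hs, hseq⟩ := List.mem_map.mp h1
      obtain ⟨r, hrg, hreq⟩ := List.mem_map.mp hs
      have hlr := hlen r hrg
      have hlq : r'.length = (pvSortD r').length := (PySem.List.length_sorted _ _ _).symm
      rw [← hseq, ← hreq, List.length_tail] at hlq
      have hls : (pvSortD r).length = r.length := PySem.List.length_sorted r (fun x => x) true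
      omega
    have hmain := ih g' (counts + pvColMax ((r0 :: rs).map pvSortD) 0) hg'ne hg'len
    have hshift : ∀ i, pvColMax (g'.map pvSortD) i = pvColMax ((r0 :: rs).map pvSortD) (i + 1) := by
      intro i; rw [hmap, pvColMax_tail]
    have hhd : ((r0 :: rs).headD []).isEmpty = false := by
      simp [hr0]
    rw [pvLoop, hhd]
    simp only [Bool.false_eq_true, if_false]
    rw [hstep, hfold, hcol0]
    show pvLoop f g' (counts + pvColMax ((r0 :: rs).map pvSortD) 0) = _
    rw [hmain]
    rw [List.range_succ_eq_map]
    simp only [List.map_cons, List.sum_cons, List.map_map]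
    have hcong : (List.range f).map (fun i => pvColMax (g'.map pvSortD) i)
        = (List.range f).map ((fun i => pvColMax ((r0 :: rs).map pvSortD) i) ∘ Nat.succ) := by
      apply List.map_congr_left
      intro i _
      exact hshift i
    rw [hcong, add_assoc]
    simp only [List.map_cons]

-- ===== VERDICT (by name: the statement is the Claim_ definition above) =====
theorem deleteGreatestValue_mine_spec : Claim_equal_deleteGreatestValue_mine := by
  intro grid _ hpre
  unfold Spec_deleteGreatestValue_mine
  cases grid with
  | nil => rfl
  | cons g0 gs =>
    have hlen : ∀ r ∈ g0 :: gs, g0.length ≤ r.length := by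
      intro r hr
      have := hpre r hr
      simpa using this
    have h := pvLoop_spec g0.length (g0 :: gs) 0 (by simp) hlen
    simp only [deleteGreatestValue_mine, List.isEmpty_cons, if_false, List.headD_cons,
      Bool.false_eq_true] at *
    rw [h, zero_add]
    rfl
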